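-- pv_equiv track=rewrite | github.com/bashar-wannous/smart_shelf_challenge | functions.py | describe_objects
-- ===== SOURCE A (Python) =====
-- def describe_objects(height_list, height_thresholds):
--     item_list = list()
--     for height in height_list:
--         if height < height_thresholds[0]:
--             item_list.append("small bottle")
--         elif height > height_thresholds[len(height_thresholds) - 1]:
--             item_list.append("large bottle")
--         else:
--             item_list.append("medium bottle")
--     return sorted(item_list)
-- ===== SOURCE B (Python) =====
-- def describe_objects(height_list, height_thresholds):
--     if not height_list:
--         return []
--     lo = height_thresholds[0]
--     hi = height_thresholds[-1]
--     ns = 0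
--     nl = 0
--     for h in height_list:
--         if h < lo:
--             ns += 1
--         elif h > hi:
--             nl += 1
--     nm = len(height_list) - ns - nl
--     return ["large bottle"] * nl + ["medium bottle"] * nm + ["small bottle"] * ns
-- ===== Notes on version B (the rewrite author's own statement) =====
-- stated objective: alternative
-- what changed: Replaces build-list-then-sort with a one-pass counting sort: count the small/large categories and emit the replicated labels directly in alphabetical order.
import Mathlib
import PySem

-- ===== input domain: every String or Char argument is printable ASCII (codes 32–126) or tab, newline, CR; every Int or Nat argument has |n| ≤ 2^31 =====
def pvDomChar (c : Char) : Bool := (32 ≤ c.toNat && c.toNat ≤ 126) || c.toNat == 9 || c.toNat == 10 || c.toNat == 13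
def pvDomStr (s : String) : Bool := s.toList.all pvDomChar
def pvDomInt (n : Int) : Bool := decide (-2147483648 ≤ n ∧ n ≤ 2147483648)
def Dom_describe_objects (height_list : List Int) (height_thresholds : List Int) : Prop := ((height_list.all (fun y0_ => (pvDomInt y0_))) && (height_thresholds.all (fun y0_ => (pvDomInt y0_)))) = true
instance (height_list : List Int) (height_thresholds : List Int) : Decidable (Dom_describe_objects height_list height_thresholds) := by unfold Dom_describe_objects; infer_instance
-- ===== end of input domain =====

-- B replaces build-list-then-sort with a one-pass counting sort: count the categories and emit the replicated labels in alphabetical order.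

-- ===== PORT A =====
def describe_objects (height_list : List Int) (height_thresholds : List Int) : List String :=
  let item_list := height_list.foldl (fun acc height =>
    if height < (PySem.List.pyGet? height_thresholds 0).getD 0 then
      acc ++ ["small bottle"]
    else if height > (PySem.List.pyGet? height_thresholds ((height_thresholds.length : Int) - 1)).getD 0 then
      acc ++ ["large bottle"]
    else
      acc ++ ["medium bottle"]) []
  PySem.List.sorted item_list (fun x => x) false

-- ===== PORT B =====
def describe_objects_alt (height_list : List Int) (height_thresholds : List Int) : List String :=
  if height_list = [] then []
  else
    let lo := (PySem.List.pyGet? height_thresholds 0).getD 0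
    let hi := (PySem.List.pyGet? height_thresholds (-1)).getD 0
    let c := height_list.foldl (fun (acc : Nat × Nat) h =>
      if h < lo then (acc.1 + 1, acc.2)
      else if h > hi then (acc.1, acc.2 + 1)
      else acc) (0, 0)
    let nm := height_list.length - c.1 - c.2
    List.replicate c.2 "large bottle" ++ List.replicate nm "medium bottle" ++ List.replicate c.1 "small bottle"

-- ===== PRECONDITION & SPEC =====
-- Pre_ excludes exactly the inputs where A raises IndexError: a nonempty height_list with empty height_thresholds.
def Pre_describe_objects (height_list : List Int) (height_thresholds : List Int) : Prop :=
  height_list = [] ∨ height_thresholds ≠ []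
instance (height_list : List Int) (height_thresholds : List Int) : Decidable (Pre_describe_objects height_list height_thresholds) := by unfold Pre_describe_objects; infer_instance
def pvWitness_describe_objects : List Int × List Int := ([1, 5, 9], [3, 7])

def Spec_describe_objects (height_list : List Int) (height_thresholds : List Int) (out : List String) : Prop := out = describe_objects_alt height_list height_thresholds
instance (height_list : List Int) (height_thresholds : List Int) (out : List String) : Decidable (Spec_describe_objects height_list height_thresholds out) := by unfold Spec_describe_objects; infer_instance

-- ===== CLAIM (what is proved, stated in full; the proofs are below) =====
def Claim_equal_describe_objects : Prop := ∀ (height_list : List Int) (height_thresholds : List Int), Dom_describe_objects height_list height_thresholds → Pre_describe_objects height_list height_thresholds → Spec_describe_objects height_list height_thresholds (describe_objects height_list height_thresholds)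

-- ===== LEMMAS AND PROOFS =====

-- the classification function both loops apply element-wise
def pvClassify (lo hi : Int) (h : Int) : String :=
  if h < lo then "small bottle" else if h > hi then "large bottle" else "medium bottle"

-- A's loop builds the map of pvClassify
theorem pvA_loop_map (lo hi : Int) (hl : List Int) (acc : List String) :
    hl.foldl (fun acc h =>
      if h < lo then acc ++ ["small bottle"]
      else if h > hi then acc ++ ["large bottle"]
      else acc ++ ["medium bottle"]) acc = acc ++ hl.map (pvClassify lo hi) := by
  induction hl generalizing acc with
  | nil => simp
  | cons h t ih =>
    rw [List.foldl_cons, List.map_cons, ih]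
    have : (if h < lo then acc ++ ["small bottle"]
        else if h > hi then acc ++ ["large bottle"]
        else acc ++ ["medium bottle"]) = acc ++ [pvClassify lo hi h] := by
      unfold pvClassify; split_ifs <;> rfl
    rw [this, List.append_assoc]; rfl

-- B's loop computes the small/large counts of the mapped list
theorem pvB_loop_count (lo hi : Int) (hl : List Int) (s l : Nat) :
    hl.foldl (fun (acc : Nat × Nat) h =>
      if h < lo then (acc.1 + 1, acc.2)
      else if h > hi then (acc.1, acc.2 + 1)
      else acc) (s, l) =
    (s + (hl.map (pvClassify lo hi)).count "small bottle",
     l + (hl.map (pvClassify lo hi)).count "large bottle") := by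
  induction hl generalizing s l with
  | nil => simp
  | cons h t ih =>
    rw [List.foldl_cons, List.map_cons]
    by_cases h1 : h < lo
    · have hc : pvClassify lo hi h = "small bottle" := by simp [pvClassify, h1]
      simp only [if_pos h1, ih, hc, List.count_cons]
      simp [Prod.ext_iff]
      omega
    · by_cases h2 : h > hi
      · have hc : pvClassify lo hi h = "large bottle" := by
          simp [pvClassify, h1, h2]
        simp only [if_neg h1, if_pos h2, ih, hc, List.count_cons]
        simp [Prod.ext_iff]
        omega
      · have hc : pvClassify lo hi h = "medium bottle" := by
          simp [pvClassify, h1, h2]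
        simp only [if_neg h1, if_neg h2, ih, hc, List.count_cons]
        simp

theorem pvClassify_mem (lo hi h : Int) :
    pvClassify lo hi h = "small bottle" ∨ pvClassify lo hi h = "medium bottle" ∨
    pvClassify lo hi h = "large bottle" := by
  unfold pvClassify; split_ifs <;> simp

-- the replicate concatenation is a permutation of the mapped list
theorem pvPerm (lo hi : Int) (hl : List Int) :
    (List.replicate ((hl.map (pvClassify lo hi)).count "large bottle") "large bottle" ++
     List.replicate ((hl.map (pvClassify lo hi)).count "medium bottle") "medium bottle" ++
     List.replicate ((hl.map (pvClassify lo hi)).count "small bottle") "small bottle").Perm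
      (hl.map (pvClassify lo hi)) := by
  rw [List.perm_iff_count]
  intro a
  simp only [List.count_append, List.count_replicate]
  by_cases h1 : a = "large bottle"
  · subst h1; simp
  by_cases h2 : a = "medium bottle"
  · subst h2; simp
  by_cases h3 : a = "small bottle"
  · subst h3; simp
  · have hz : (hl.map (pvClassify lo hi)).count a = 0 := by
      rw [List.count_eq_zero]
      intro hmem
      obtain ⟨x, _, hx⟩ := List.mem_map.mp hmem
      rcases pvClassify_mem lo hi x with h | h | h <;> rw [hx] at h <;> simp_all
    simp [Ne.symm h1, Ne.symm h2, Ne.symm h3, hz]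

-- the replicate concatenation is sorted
theorem pvSorted (L M S : Nat) :
    (List.replicate L "large bottle" ++ List.replicate M "medium bottle" ++
     List.replicate S "small bottle").Pairwise (fun a b : String => a ≤ b) := by
  refine List.pairwise_append.mpr ⟨List.pairwise_append.mpr ⟨?_, ?_, ?_⟩, ?_, ?_⟩
  · exact List.pairwise_replicate.mpr (.inr le_rfl)
  · exact List.pairwise_replicate.mpr (.inr le_rfl)
  · intro a ha b hb
    rw [List.eq_of_mem_replicate ha, List.eq_of_mem_replicate hb]
    rw [String.le_iff_toList_le]; decide
  · exact List.pairwise_replicate.mpr (.inr le_rfl)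
  · intro a ha b hb
    rw [List.eq_of_mem_replicate hb]
    rcases List.mem_append.mp ha with h | h <;> rw [List.eq_of_mem_replicate h] <;> (rw [String.le_iff_toList_le]; decide)

-- ===== VERDICT (by name: the statement is the Claim_ definition above) =====
theorem describe_objects_spec : Claim_equal_describe_objects := by
  intro hl ts _ hpre
  unfold Spec_describe_objects describe_objects describe_objects_alt
  rcases eq_or_ne hl [] with rfl | hne
  · simp [PySem.List.sorted]
  · have hts : ts ≠ [] := by rcases hpre with h | h; exact absurd h hne; exact h
    have hpos : 0 < ts.length := List.length_pos_iff.mpr hts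
    have hidx : PySem.List.pyIdx? ts.length ((ts.length : Int) - 1) =
        PySem.List.pyIdx? ts.length (-1) := by
      simp only [PySem.List.pyIdx?]
      split_ifs <;> first | (congr 1; omega) | omega
    have hlast : PySem.List.pyGet? ts ((ts.length : Int) - 1) = PySem.List.pyGet? ts (-1) := by
      simp only [PySem.List.pyGet?, hidx]
    simp only [if_neg hne, hlast]
    set lo := (PySem.List.pyGet? ts 0).getD 0 with hlo
    set hi := (PySem.List.pyGet? ts (-1)).getD 0 with hhi
    rw [pvA_loop_map, pvB_loop_count]
    simp only [List.nil_append, Nat.zero_add]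
    have hlen : hl.length =
        ((hl.map (pvClassify lo hi)).count "large bottle" +
         (hl.map (pvClassify lo hi)).count "medium bottle") +
        (hl.map (pvClassify lo hi)).count "small bottle" := by
      have := (pvPerm lo hi hl).length_eq
      simp at this
      omega
    have hm : hl.length - (hl.map (pvClassify lo hi)).count "small bottle" -
        (hl.map (pvClassify lo hi)).count "large bottle" =
        (hl.map (pvClassify lo hi)).count "medium bottle" := by omega
    rw [hm]
    exact PySem.List.sorted_id_eq_of_perm_of_pairwise _ _ (pvPerm _ _ hl) (pvSorted _ _ _)
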